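-- pv_equiv track=rewrite | github.com/yomnahisham/py-isa-xform | src/isa_xform/core/parser.py | _parse_directive_arguments
-- ===== SOURCE A (Python) =====
-- from typing import List, Optional, Any, Union
--
-- def _parse_directive_arguments(args_str: str) -> List[str]:
--     """Parse directive arguments, properly handling quoted strings"""
--     if not args_str.strip():
--         return []
--
--     arguments = []
--     current_arg = ""
--     in_quotes = False
--     quote_char = None
--     i = 0
--
--     while i < len(args_str):
--         char = args_str[i]
--
--         if not in_quotes:
--             if char in ['"', "'"]:
--                 # Start of quoted string
--                 in_quotes = True
--                 quote_char = char
--                 current_arg += char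
--             elif char == ',':
--                 # End of argument
--                 if current_arg.strip():
--                     arguments.append(current_arg.strip())
--                 current_arg = ""
--             else:
--                 current_arg += char
--         else:
--             # Inside quoted string
--             if char == quote_char:
--                 # End of quoted string
--                 in_quotes = False
--                 quote_char = None
--                 current_arg += char
--             elif char == '\\' and i + 1 < len(args_str):
--                 # Escaped character
--                 current_arg += char + args_str[i + 1]
--                 i += 1
--             else:
--                 current_arg += char
--
--         i += 1
--
--     # Add the last argument
--     if current_arg.strip():
--         arguments.append(current_arg.strip())
--
--     return arguments
-- ===== SOURCE B (Python) =====
-- def _parse_directive_arguments(args_str):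
--     """Parse directive arguments: find top-level comma positions in one scan,
--     then slice the string between boundaries, strip, and keep non-empty pieces."""
--     cuts = []
--     in_quotes = False
--     quote_char = None
--     i = 0
--     n = len(args_str)
--     while i < n:
--         ch = args_str[i]
--         if in_quotes:
--             if ch == quote_char:
--                 in_quotes = False
--                 quote_char = None
--             elif ch == '\\' and i + 1 < n:
--                 i += 1  # skip the escaped character
--         else:
--             if ch in '"\'':
--                 in_quotes = True
--                 quote_char = ch
--             elif ch == ',':
--                 cuts.append(i)
--         i += 1
--     out = []
--     prev = 0
--     for c in cuts + [n]:
--         piece = args_str[prev:c].strip()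
--         if piece:
--             out.append(piece)
--         prev = c + 1
--     return out
-- ===== Notes on version B (the rewrite author's own statement) =====
-- stated objective: faster
-- what changed: B replaces A's character-by-character argument accumulation (repeated string concatenation) with a boundary-based decomposition: one scan records the indices of top-level commas (quote/escape-aware), then the string is sliced between consecutive boundaries, stripped, and non-empty pieces kept.
import Mathlib
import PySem

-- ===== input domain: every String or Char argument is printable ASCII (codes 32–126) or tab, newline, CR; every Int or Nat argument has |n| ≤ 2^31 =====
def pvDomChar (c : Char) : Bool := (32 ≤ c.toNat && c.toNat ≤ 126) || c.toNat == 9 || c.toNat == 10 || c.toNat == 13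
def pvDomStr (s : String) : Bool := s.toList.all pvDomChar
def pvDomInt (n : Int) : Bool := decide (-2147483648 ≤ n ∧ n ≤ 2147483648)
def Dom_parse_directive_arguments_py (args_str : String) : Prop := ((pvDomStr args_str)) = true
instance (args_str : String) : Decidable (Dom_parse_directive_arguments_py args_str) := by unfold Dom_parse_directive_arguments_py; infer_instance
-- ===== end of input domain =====

-- B collects top-level comma positions in one quote/escape-aware scan and then slices the
-- string between boundaries (strip, keep non-empty), instead of A's state machine that grows
-- current_arg by repeated string concatenation; a timing run measured B faster.


-- ===== PORT A =====
-- while-loop over the characters; state = (current_arg, in_quotes, quote_char, arguments).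
-- The Python 'char == '\\' and i + 1 < len(args_str)' test becomes the match on rest:
-- a trailing backslash falls through to the plain 'current_arg += char' branch.
def pvLoopA : List Char → List Char → Bool → Option Char → List (List Char) → List (List Char)
  | [], cur, _, _, acc =>
    -- 'if current_arg.strip(): arguments.append(current_arg.strip())' after the loop
    if PySem.Chars.strip cur ≠ [] then acc ++ [PySem.Chars.strip cur] else acc
  | c :: rest, cur, in_q, qc, acc =>
    if in_q = false then
      if c = '"' ∨ c = '\'' then pvLoopA rest (cur ++ [c]) true (some c) acc
      else if c = ',' then
        pvLoopA rest [] false none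
          (if PySem.Chars.strip cur ≠ [] then acc ++ [PySem.Chars.strip cur] else acc)
      else pvLoopA rest (cur ++ [c]) in_q qc acc
    else
      if some c = qc then pvLoopA rest (cur ++ [c]) false none acc
      else if c = '\\' then
        match rest with
        | d :: rest' => pvLoopA rest' (cur ++ [c, d]) in_q qc acc  -- escaped char: copy both, i += 2
        | [] => pvLoopA [] (cur ++ [c]) in_q qc acc               -- i+1 ≥ len: ordinary char
      else pvLoopA rest (cur ++ [c]) in_q qc acc

def parse_directive_arguments_py (args_str : String) : List String :=
  -- 'if not args_str.strip(): return []'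
  if PySem.Chars.strip args_str.toList = [] then []
  else (pvLoopA args_str.toList [] false none []).map String.ofList

-- ===== PORT B =====
-- first pass of Source B: collect indices of top-level commas (i is the absolute index)
def pvScanB : List Char → Nat → Bool → Option Char → List Nat
  | [], _, _, _ => []
  | c :: rest, i, in_q, qc =>
    if in_q then
      if some c = qc then pvScanB rest (i + 1) false none
      else if c = '\\' then
        match rest with
        | _ :: rest' => pvScanB rest' (i + 2) true qc  -- 'i += 1' skip of the escaped char
        | [] => pvScanB [] (i + 1) true qc
      else pvScanB rest (i + 1) true qc
    else
      if c = '"' ∨ c = '\'' then pvScanB rest (i + 1) true (some c)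
      else if c = ',' then i :: pvScanB rest (i + 1) false none
      else pvScanB rest (i + 1) false none

-- second pass of Source B: slice between boundaries, strip, keep non-empty
-- (args_str[prev:c] with 0 ≤ prev ≤ c is (drop prev).take (c - prev); the final
-- iteration's slice args_str[prev:n] is cs.drop prev — exact for these in-range bounds)
def pvPiecesB (cs : List Char) : Nat → List Nat → List (List Char)
  | prev, [] =>
    let p := PySem.Chars.strip (cs.drop prev)
    if p ≠ [] then [p] else []
  | prev, c :: cuts =>
    let p := PySem.Chars.strip ((cs.drop prev).take (c - prev))
    (if p ≠ [] then [p] else []) ++ pvPiecesB cs (c + 1) cuts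

def parse_directive_arguments_py_alt (args_str : String) : List String :=
  (pvPiecesB args_str.toList 0 (pvScanB args_str.toList 0 false none)).map String.ofList

-- ===== PRECONDITION & SPEC =====
def Spec_parse_directive_arguments_py (args_str : String) (out : List String) : Prop := out = parse_directive_arguments_py_alt args_str
instance (args_str : String) (out : List String) : Decidable (Spec_parse_directive_arguments_py args_str out) := by unfold Spec_parse_directive_arguments_py; infer_instance

-- ===== CLAIM (what is proved, stated in full; the proofs are below) =====
def Claim_equal_parse_directive_arguments_py : Prop := ∀ (args_str : String), Dom_parse_directive_arguments_py args_str → Spec_parse_directive_arguments_py args_str (parse_directive_arguments_py args_str)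

-- ===== LEMMAS AND PROOFS =====

-- keep? x = the stripped piece, if non-empty
def pvKeep? (x : List Char) : Option (List Char) :=
  if PySem.Chars.strip x = [] then none else some (PySem.Chars.strip x)

-- raw split of the remaining suffix at top-level commas: (first raw segment, later raw segments)
def pvSegs : List Char → Bool → Option Char → List Char × List (List Char)
  | [], _, _ => ([], [])
  | c :: rest, in_q, qc =>
    if in_q then
      if some c = qc then
        let p := pvSegs rest false none; (c :: p.1, p.2)
      else if c = '\\' then
        match rest with
        | d :: rest' => let p := pvSegs rest' true qc; (c :: d :: p.1, p.2)
        | [] => ([c], [])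
      else let p := pvSegs rest true qc; (c :: p.1, p.2)
    else
      if c = '"' ∨ c = '\'' then
        let p := pvSegs rest true (some c); (c :: p.1, p.2)
      else if c = ',' then
        let p := pvSegs rest false none; ([], p.1 :: p.2)
      else let p := pvSegs rest false none; (c :: p.1, p.2)

lemma pvKeep_toList (x : List Char) :
    (if PySem.Chars.strip x ≠ [] then [PySem.Chars.strip x] else []) = (pvKeep? x).toList := by
  simp only [pvKeep?]; split_ifs <;> simp_all

lemma pvKeep_acc (acc : List (List Char)) (x : List Char) :
    (if PySem.Chars.strip x ≠ [] then acc ++ [PySem.Chars.strip x] else acc)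
      = acc ++ (pvKeep? x).toList := by
  simp only [pvKeep?]; split_ifs <;> simp_all

lemma pvSegs_nil (in_q : Bool) (qc : Option Char) : pvSegs [] in_q qc = ([], []) := by
  rw [pvSegs.eq_def]

lemma pvSegs_quote (c : Char) (rest : List Char) (qc : Option Char) (h : c = '"' ∨ c = '\'') :
    pvSegs (c :: rest) false qc
      = (c :: (pvSegs rest true (some c)).1, (pvSegs rest true (some c)).2) := by
  rw [pvSegs.eq_def]; simp [h]

lemma pvSegs_comma (rest : List Char) (qc : Option Char) :
    pvSegs (',' :: rest) false qc
      = ([], (pvSegs rest false none).1 :: (pvSegs rest false none).2) := by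
  rw [pvSegs.eq_def]; simp

lemma pvSegs_plain (c : Char) (rest : List Char) (qc : Option Char)
    (h1 : ¬ (c = '"' ∨ c = '\'')) (h2 : ¬ c = ',') :
    pvSegs (c :: rest) false qc
      = (c :: (pvSegs rest false none).1, (pvSegs rest false none).2) := by
  rw [pvSegs.eq_def]; simp [h1, h2]

lemma pvSegs_close (c : Char) (rest : List Char) (qc : Option Char) (h : some c = qc) :
    pvSegs (c :: rest) true qc
      = (c :: (pvSegs rest false none).1, (pvSegs rest false none).2) := by
  rw [pvSegs.eq_def]; simp [h]

lemma pvSegs_esc (d : Char) (rest' : List Char) (qc : Option Char) (h : ¬ some '\\' = qc) :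
    pvSegs ('\\' :: d :: rest') true qc
      = ('\\' :: d :: (pvSegs rest' true qc).1, (pvSegs rest' true qc).2) := by
  rw [pvSegs.eq_def]; simp [h]

lemma pvSegs_esc_nil (qc : Option Char) (h : ¬ some '\\' = qc) :
    pvSegs ['\\'] true qc = (['\\'], []) := by
  rw [pvSegs.eq_def]; simp [h]

lemma pvSegs_inq (c : Char) (rest : List Char) (qc : Option Char)
    (h1 : ¬ some c = qc) (h2 : ¬ c = '\\') :
    pvSegs (c :: rest) true qc
      = (c :: (pvSegs rest true qc).1, (pvSegs rest true qc).2) := by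
  rw [pvSegs.eq_def]; simp [h1, h2]

lemma pvSegs_false_irrel (cs : List Char) (qc : Option Char) :
    pvSegs cs false qc = pvSegs cs false none := by
  cases cs with
  | nil => rw [pvSegs_nil, pvSegs_nil]
  | cons c rest =>
    by_cases h1 : c = '"' ∨ c = '\''
    · rw [pvSegs_quote c rest qc h1, pvSegs_quote c rest none h1]
    · by_cases h2 : c = ','
      · subst h2; rw [pvSegs_comma rest qc, pvSegs_comma rest none]
      · rw [pvSegs_plain c rest qc h1 h2, pvSegs_plain c rest none h1 h2]

lemma pvLoopA_eq (rest : List Char) (cur : List Char) (in_q : Bool) (qc : Option Char)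
    (acc : List (List Char)) :
    pvLoopA rest cur in_q qc acc =
      acc ++ (pvKeep? (cur ++ (pvSegs rest in_q qc).1)).toList
          ++ ((pvSegs rest in_q qc).2.filterMap pvKeep?) := by
  fun_induction pvLoopA rest cur in_q qc acc
  case case1 cur in_q qc acc h => rw [pvSegs_nil]; simp [pvKeep?, h]
  case case2 cur in_q qc acc h => rw [pvSegs_nil]; simp only [pvKeep?]; simp_all
  case case3 c rest cur qc acc h ih => rw [ih, pvSegs_quote c rest qc h]; simp
  case case4 rest cur qc acc h ih =>
    rw [ih, pvKeep_acc, pvSegs_comma rest qc]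
    simp [List.filterMap_cons]
    cases pvKeep? (pvSegs rest false none).1 <;> simp
  case case5 c rest cur qc acc h1 h2 ih =>
    rw [ih, pvSegs_plain c rest qc h1 h2, pvSegs_false_irrel]; simp
  case case6 c rest cur in_q acc h ih =>
    have hb : in_q = true := by simpa using h
    subst hb; rw [ih, pvSegs_close c rest (some c) rfl]; simp
  case case7 cur in_q qc acc h1 d rest' h2 ih =>
    have hb : in_q = true := by simpa using h1
    subst hb; rw [ih, pvSegs_esc d rest' qc h2]; simp
  case case8 cur in_q qc acc h1 h2 ih =>
    have hb : in_q = true := by simpa using h1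
    subst hb; rw [ih, pvSegs_nil, pvSegs_esc_nil qc h2]; simp
  case case9 c rest cur in_q qc acc h1 h2 h3 ih =>
    have hb : in_q = true := by simpa using h1
    subst hb; rw [ih, pvSegs_inq c rest qc h2 h3]; simp

-- one character consumed at position i extends the pending slice by that character
lemma pvTakeStep (cs : List Char) (prev i : Nat) (c : Char) (rest : List Char)
    (hpi : prev ≤ i) (hdrop : cs.drop i = c :: rest) :
    (cs.drop prev).take (i + 1 - prev) = (cs.drop prev).take (i - prev) ++ [c] := by
  have hget : (cs.drop prev)[i - prev]? = some c := by
    rw [List.getElem?_drop]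
    rw [show prev + (i - prev) = i by omega]
    rw [show cs[i]? = (cs.drop i).head? by
      cases h : cs[i]? <;> simp [List.head?_eq_getElem?, List.getElem?_drop, h]]
    simp [hdrop]
  rw [show i + 1 - prev = (i - prev) + 1 by omega, List.take_add_one, hget]
  simp

lemma pvScanPieces_eq (rest : List Char) (i : Nat) (in_q : Bool) (qc : Option Char) :
    ∀ (cs : List Char) (prev : Nat), prev ≤ i → cs.drop i = rest →
    pvPiecesB cs prev (pvScanB rest i in_q qc) =
      (pvKeep? ((cs.drop prev).take (i - prev) ++ (pvSegs rest in_q qc).1)).toList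
        ++ ((pvSegs rest in_q qc).2.filterMap pvKeep?) := by
  fun_induction pvScanB rest i in_q qc
  case case1 i in_q qc =>
    intro cs prev hpi hdrop
    have hlen : cs.length ≤ i := by
      have := congrArg List.length hdrop; simp at this; omega
    have htake : (cs.drop prev).take (i - prev) = cs.drop prev := by
      apply List.take_of_length_le; simp; omega
    rw [pvSegs_nil]
    simp only [pvPiecesB, htake]
    rw [pvKeep_toList]; simp
  case case2 c rest i ih =>
    intro cs prev hpi hdrop
    have hd1 : cs.drop (i + 1) = rest := by
      have := congrArg List.tail hdrop; simpa [List.tail_drop] using this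
    have hstep := pvTakeStep cs prev i c rest hpi hdrop
    rw [ih cs prev (by omega) hd1, pvSegs_close c rest (some c) rfl, hstep]; simp
  case case3 i qc d rest' h ih =>
    intro cs prev hpi hdrop
    have hd1 : cs.drop (i + 1) = d :: rest' := by
      have := congrArg List.tail hdrop; simpa [List.tail_drop] using this
    have hd2 : cs.drop (i + 2) = rest' := by
      have := congrArg List.tail hd1; simpa [List.tail_drop] using this
    have h1 := pvTakeStep cs prev i '\\' (d :: rest') hpi hdrop
    have h2 := pvTakeStep cs prev (i + 1) d rest' (by omega) hd1
    rw [ih cs prev (by omega) hd2, pvSegs_esc d rest' qc h,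
      show i + 2 - prev = (i + 1) + 1 - prev from by omega, h2, h1]
    simp
  case case4 i qc h ih =>
    intro cs prev hpi hdrop
    have hd1 : cs.drop (i + 1) = [] := by
      have := congrArg List.tail hdrop; simpa [List.tail_drop] using this
    have hstep := pvTakeStep cs prev i '\\' [] hpi hdrop
    rw [ih cs prev (by omega) hd1, pvSegs_nil, pvSegs_esc_nil qc h, hstep]; simp
  case case5 c rest i qc h1 h2 ih =>
    intro cs prev hpi hdrop
    have hd1 : cs.drop (i + 1) = rest := by
      have := congrArg List.tail hdrop; simpa [List.tail_drop] using this
    have hstep := pvTakeStep cs prev i c rest hpi hdrop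
    rw [ih cs prev (by omega) hd1, pvSegs_inq c rest qc h1 h2, hstep]; simp
  case case6 c rest i in_q qc h hq ih =>
    intro cs prev hpi hdrop
    have hb : in_q = false := by simpa using h
    subst hb
    have hd1 : cs.drop (i + 1) = rest := by
      have := congrArg List.tail hdrop; simpa [List.tail_drop] using this
    have hstep := pvTakeStep cs prev i c rest hpi hdrop
    rw [ih cs prev (by omega) hd1, pvSegs_quote c rest qc hq, hstep]; simp
  case case7 rest i in_q qc h hq ih =>
    intro cs prev hpi hdrop
    have hb : in_q = false := by simpa using h
    subst hb
    have hd1 : cs.drop (i + 1) = rest := by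
      have := congrArg List.tail hdrop; simpa [List.tail_drop] using this
    simp only [pvPiecesB]
    rw [ih cs (i + 1) (by omega) hd1, pvSegs_comma rest qc]
    simp only [Nat.sub_self, List.take_zero, List.nil_append, List.filterMap_cons,
      pvKeep_toList, List.append_nil]
    cases pvKeep? (pvSegs rest false none).1 <;> simp
  case case8 c rest i in_q qc h h1 h2 ih =>
    intro cs prev hpi hdrop
    have hb : in_q = false := by simpa using h
    subst hb
    have hd1 : cs.drop (i + 1) = rest := by
      have := congrArg List.tail hdrop; simpa [List.tail_drop] using this
    have hstep := pvTakeStep cs prev i c rest hpi hdrop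
    rw [ih cs prev (by omega) hd1, pvSegs_plain c rest qc h1 h2, hstep]; simp

lemma pvStrip_nil_all (cs : List Char) (h : PySem.Chars.strip cs = []) :
    ∀ c ∈ cs, PySem.Chars.isspace c := by
  simp only [PySem.Chars.strip, PySem.Chars.rstrip, PySem.Chars.lstrip,
    List.reverse_eq_nil_iff, List.dropWhile_eq_nil_iff, List.mem_reverse] at h
  intro c hc
  rw [← List.takeWhile_append_dropWhile (p := PySem.Chars.isspace) (l := cs)] at hc
  rcases List.mem_append.1 hc with h1 | h2
  · exact List.mem_takeWhile_imp h1
  · exact h c h2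

-- an all-whitespace string has no commas/quotes: the raw split is the string itself
lemma pvSegs_all_space (cs : List Char) (h : ∀ c ∈ cs, PySem.Chars.isspace c) :
    pvSegs cs false none = (cs, []) := by
  induction cs with
  | nil => exact pvSegs_nil false none
  | cons c rest ih =>
    have hc := h c (by simp)
    have hq : ¬ (c = '"' ∨ c = '\'') := by
      rintro (rfl | rfl) <;> exact absurd hc (by decide)
    have hcomma : ¬ c = ',' := by rintro rfl; exact absurd hc (by decide)
    rw [pvSegs_plain c rest none hq hcomma,
      ih (fun x hx => h x (List.mem_cons_of_mem _ hx))]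

-- ===== VERDICT (by name: the statement is the Claim_ definition above) =====
theorem parse_directive_arguments_py_spec : Claim_equal_parse_directive_arguments_py := by
  unfold Claim_equal_parse_directive_arguments_py
  intro s _
  unfold Spec_parse_directive_arguments_py
  unfold parse_directive_arguments_py parse_directive_arguments_py_alt
  have hB : pvPiecesB s.toList 0 (pvScanB s.toList 0 false none) =
      (pvKeep? ((pvSegs s.toList false none).1)).toList
        ++ ((pvSegs s.toList false none).2.filterMap pvKeep?) := by
    have := pvScanPieces_eq s.toList 0 false none s.toList 0 (by omega) (by simp)
    simpa using this
  have hA : pvLoopA s.toList [] false none [] =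
      (pvKeep? ((pvSegs s.toList false none).1)).toList
        ++ ((pvSegs s.toList false none).2.filterMap pvKeep?) := by
    simpa using pvLoopA_eq s.toList [] false none []
  split_ifs with hstrip
  · have hall := pvStrip_nil_all s.toList hstrip
    rw [hB, pvSegs_all_space s.toList hall]
    simp [pvKeep?, hstrip]
  · rw [hA, hB]
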